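-- pv_equiv track=rewrite | github.com/jennischofield/fractect | fasterrcnn.py | filter_categories
-- ===== SOURCE A (Python) =====
-- def filter_categories(boxes, labels, scores, categories):
--     to_keep = []
--     for index in range(len(boxes)):
--         if labels[index] in categories:
--             to_keep.append(index)
--     ret_list_boxes = [boxes[i] for i in to_keep]
--     ret_list_labels = [labels[i] for i in to_keep]
--     ret_list_scores = [scores[i] for i in to_keep]
--     return ret_list_boxes, ret_list_labels, ret_list_scores
-- ===== SOURCE B (Python) =====
-- def filter_categories(boxes, labels, scores, categories):
--     rb, rl, rs = [], [], []
--     for i in range(len(boxes)):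
--         if labels[i] in categories:
--             rb.append(boxes[i])
--             rl.append(labels[i])
--             rs.append(scores[i])
--     return rb, rl, rs
-- ===== Notes on version B (the rewrite author's own statement) =====
-- stated objective: simpler
-- what changed: Single fused pass maintaining three accumulator lists, instead of building a to_keep index list and then scanning it with three separate comprehensions.
import Mathlib
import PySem

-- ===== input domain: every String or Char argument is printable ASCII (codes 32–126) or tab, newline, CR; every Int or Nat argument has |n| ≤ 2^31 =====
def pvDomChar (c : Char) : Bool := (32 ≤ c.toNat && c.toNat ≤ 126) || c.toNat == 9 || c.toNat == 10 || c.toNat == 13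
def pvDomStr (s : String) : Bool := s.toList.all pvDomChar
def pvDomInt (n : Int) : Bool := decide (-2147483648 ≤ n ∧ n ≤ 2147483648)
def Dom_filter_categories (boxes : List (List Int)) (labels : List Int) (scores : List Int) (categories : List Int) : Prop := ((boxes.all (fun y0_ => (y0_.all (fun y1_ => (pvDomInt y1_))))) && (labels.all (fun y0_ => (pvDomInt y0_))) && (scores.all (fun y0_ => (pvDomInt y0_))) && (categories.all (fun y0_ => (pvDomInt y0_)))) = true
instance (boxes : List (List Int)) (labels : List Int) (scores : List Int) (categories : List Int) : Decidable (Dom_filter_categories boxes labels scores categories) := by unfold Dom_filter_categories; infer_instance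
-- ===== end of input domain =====

-- B replaces A's index-collection-plus-three-projections with a single fused pass keeping three accumulators (simpler decomposition, same result).


-- ===== PORT A =====
-- labels[index] / boxes[i] / labels[i] / scores[i] via pyGetD: exact on Pre_ (all used indices in range)
def filter_categories (boxes : List (List Int)) (labels : List Int) (scores : List Int) (categories : List Int) : List (List Int) × List Int × List Int :=
  let to_keep : List Int :=
    (PySem.List.pyRange 0 (boxes.length : Int) 1).foldl
      (fun acc index => if PySem.List.pyGetD labels index 0 ∈ categories then acc ++ [index] else acc) []
  let ret_list_boxes := to_keep.map (fun i => PySem.List.pyGetD boxes i [])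
  let ret_list_labels := to_keep.map (fun i => PySem.List.pyGetD labels i 0)
  let ret_list_scores := to_keep.map (fun i => PySem.List.pyGetD scores i 0)
  (ret_list_boxes, ret_list_labels, ret_list_scores)

-- ===== PORT B =====
-- one pass over range(len(boxes)) with three accumulator lists
def filter_categories_alt (boxes : List (List Int)) (labels : List Int) (scores : List Int) (categories : List Int) : List (List Int) × List Int × List Int :=
  (PySem.List.pyRange 0 (boxes.length : Int) 1).foldl
    (fun s i =>
      if PySem.List.pyGetD labels i 0 ∈ categories then
        (s.1 ++ [PySem.List.pyGetD boxes i []], s.2.1 ++ [PySem.List.pyGetD labels i 0], s.2.2 ++ [PySem.List.pyGetD scores i 0])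
      else s)
    ([], [], [])

-- ===== PRECONDITION & SPEC =====
-- Pre_ excludes exactly the inputs on which Python A raises IndexError: labels shorter than boxes,
-- or a kept index (label in categories) reaching past the end of scores. B raises there too.
def Pre_filter_categories (boxes : List (List Int)) (labels : List Int) (scores : List Int) (categories : List Int) : Prop :=
  boxes.length ≤ labels.length ∧
  ∀ i ∈ List.range boxes.length, labels.getD i 0 ∈ categories → i < scores.length
instance (boxes : List (List Int)) (labels : List Int) (scores : List Int) (categories : List Int) : Decidable (Pre_filter_categories boxes labels scores categories) := by unfold Pre_filter_categories; infer_instance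
def pvWitness_filter_categories : List (List Int) × List Int × List Int × List Int := ([[1, 2], [3], [4]], [1, 2, 3], [9, 8, 7], [1, 3])
def Spec_filter_categories (boxes : List (List Int)) (labels : List Int) (scores : List Int) (categories : List Int) (out : List (List Int) × List Int × List Int) : Prop := out = filter_categories_alt boxes labels scores categories
instance (boxes : List (List Int)) (labels : List Int) (scores : List Int) (categories : List Int) (out : List (List Int) × List Int × List Int) : Decidable (Spec_filter_categories boxes labels scores categories out) := by unfold Spec_filter_categories; infer_instance

-- ===== CLAIM (what is proved, stated in full; the proofs are below) =====
def Claim_equal_filter_categories : Prop := ∀ (boxes : List (List Int)) (labels : List Int) (scores : List Int) (categories : List Int), Dom_filter_categories boxes labels scores categories → Pre_filter_categories boxes labels scores categories → Spec_filter_categories boxes labels scores categories (filter_categories boxes labels scores categories)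

-- ===== LEMMAS AND PROOFS =====

-- B's fused fold, started at any accumulators, appends the three projections of the kept indices.
theorem pv_fused_fold (p : Int → Prop) [DecidablePred p] (fb : Int → List Int) (fl fs : Int → Int)
    (L : List Int) (rb : List (List Int)) (rl rs : List Int) :
    L.foldl (fun (s : List (List Int) × List Int × List Int) i =>
        if p i then (s.1 ++ [fb i], s.2.1 ++ [fl i], s.2.2 ++ [fs i]) else s) (rb, rl, rs)
      = (rb ++ (L.filter (fun i => decide (p i))).map fb,
         rl ++ (L.filter (fun i => decide (p i))).map fl,
         rs ++ (L.filter (fun i => decide (p i))).map fs) := by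
  induction L generalizing rb rl rs with
  | nil => simp
  | cons x L ih =>
    by_cases h : p x <;> simp [List.foldl_cons, List.filter_cons, h, ih]

theorem filter_categories_eq_alt (boxes : List (List Int)) (labels : List Int)
    (scores : List Int) (categories : List Int) :
    filter_categories boxes labels scores categories
      = filter_categories_alt boxes labels scores categories := by
  unfold filter_categories filter_categories_alt
  rw [pv_fused_fold (fun i => PySem.List.pyGetD labels i 0 ∈ categories)
      (fun i => PySem.List.pyGetD boxes i []) (fun i => PySem.List.pyGetD labels i 0)
      (fun i => PySem.List.pyGetD scores i 0)]
  rw [PySem.List.foldl_append_ite_eq_filter]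
  simp

-- ===== VERDICT (by name: the statement is the Claim_ definition above) =====
theorem filter_categories_spec : Claim_equal_filter_categories := by
  intro boxes labels scores categories _ _
  unfold Spec_filter_categories
  exact filter_categories_eq_alt boxes labels scores categories
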